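-- pv_equiv track=rewrite | github.com/AstridDieguez/project-milestone-3 | wiki.py | queryAdjustRegex
-- ===== SOURCE A (Python) =====
-- def arrayToString(array):
--     s = ""
--     for item in array:
--         s += str(item)
--     return s
--
-- def queryAdjustRegex(query):
--     arr = [c for c in query]
--     for c in range(len(arr)):
--         # A-Z [65-90], a-z [97-122], 0-9 [48-57]
--         if(not (ord(arr[c]) >= 65 and ord(arr[c]) <= 90 or
--             ord(arr[c]) >= 97 and ord(arr[c]) <= 122 or
--             ord(arr[c]) >= 48 and ord(arr[c]) <= 57 or
--             ord(arr[c]) == 32)):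
--             arr[c] = ".*"
--         else:
--             arr[c] = "" + arr[c]
--     query = arrayToString(arr)
--     return query
-- ===== SOURCE B (Python) =====
-- import re
--
-- _NON_ALLOWED = re.compile(r'[^A-Za-z0-9 ]')
--
-- def queryAdjustRegex(query):
--     return _NON_ALLOWED.sub('.*', query)
-- ===== Notes on version B (the rewrite author's own statement) =====
-- stated objective: idiomatic
-- what changed: Replaced the explicit per-index list mutation plus string-concatenation helper with a single declarative regex substitution over the ASCII class [^A-Za-z0-9 ].
import Mathlib
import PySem

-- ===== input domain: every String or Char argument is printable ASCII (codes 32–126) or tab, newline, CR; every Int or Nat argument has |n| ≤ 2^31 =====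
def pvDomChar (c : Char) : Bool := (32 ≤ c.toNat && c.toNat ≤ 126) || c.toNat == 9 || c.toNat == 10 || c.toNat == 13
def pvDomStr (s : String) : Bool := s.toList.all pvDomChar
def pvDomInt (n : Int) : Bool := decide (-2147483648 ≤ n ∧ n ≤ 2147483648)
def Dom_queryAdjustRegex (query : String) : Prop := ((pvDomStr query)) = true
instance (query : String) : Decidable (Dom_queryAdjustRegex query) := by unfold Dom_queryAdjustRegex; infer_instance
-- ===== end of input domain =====

-- B replaces A's per-index list rewrite + concatenation helper with one regex substitution
-- over the ASCII class [^A-Za-z0-9 ] (objective: idiomatic).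


-- ===== PORT A =====
-- helper arrayToString: concatenates the pieces one by one with += (pieces kept as List Char).
def arrayToString (array : List (List Char)) : List Char :=
  array.foldl (fun s item => s ++ item) []

-- A: build the char list, rewrite each position to ".*" or the char itself, then join with arrayToString.
def queryAdjustRegex (query : String) : String :=
  let arr : List (List Char) :=
    query.toList.map (fun c =>
      if ¬ (65 ≤ c.toNat ∧ c.toNat ≤ 90 ∨
            97 ≤ c.toNat ∧ c.toNat ≤ 122 ∨
            48 ≤ c.toNat ∧ c.toNat ≤ 57 ∨
            c.toNat = 32) then
        ['.', '*']
      else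
        [] ++ [c])
  String.ofList (arrayToString arr)

-- ===== PORT B =====
-- B: re.sub(r'[^A-Za-z0-9 ]', '.*', query). For a single-character class this substitution is
-- exactly a char-wise replacement, ported as a flatMap over the characters (exact on this pattern).
def queryAdjustRegex_alt (query : String) : String :=
  String.ofList (query.toList.flatMap (fun c =>
    if (65 ≤ c.toNat ∧ c.toNat ≤ 90) ∨ (97 ≤ c.toNat ∧ c.toNat ≤ 122) ∨
       (48 ≤ c.toNat ∧ c.toNat ≤ 57) ∨ c.toNat = 32 then
      [c]
    else
      ['.', '*']))

-- ===== PRECONDITION & SPEC =====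
def Spec_queryAdjustRegex (query : String) (out : String) : Prop := out = queryAdjustRegex_alt query
instance (query : String) (out : String) : Decidable (Spec_queryAdjustRegex query out) := by unfold Spec_queryAdjustRegex; infer_instance

-- ===== CLAIM (what is proved, stated in full; the proofs are below) =====
def Claim_equal_queryAdjustRegex : Prop := ∀ (query : String), Dom_queryAdjustRegex query → Spec_queryAdjustRegex query (queryAdjustRegex query)

-- ===== LEMMAS AND PROOFS =====
theorem arrayToString_eq_flatten (array : List (List Char)) :
    arrayToString array = array.flatten := by
  unfold arrayToString
  rw [PySem.List.foldl_append_eq_flatMap]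
  simp [List.flatMap_id']

-- ===== VERDICT (by name: the statement is the Claim_ definition above) =====
theorem queryAdjustRegex_spec : Claim_equal_queryAdjustRegex := by
  intro query _
  unfold Spec_queryAdjustRegex queryAdjustRegex queryAdjustRegex_alt
  simp only [arrayToString_eq_flatten]
  congr 1
  rw [← List.flatMap_def]
  apply List.flatMap_congr
  intro c _
  by_cases h : (65 ≤ c.toNat ∧ c.toNat ≤ 90) ∨ (97 ≤ c.toNat ∧ c.toNat ≤ 122) ∨
      (48 ≤ c.toNat ∧ c.toNat ≤ 57) ∨ c.toNat = 32 <;> simp [h]
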